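-- pv_equiv track=rewrite | github.com/NixFester/lariyuk | whatsapp extract.py | guess_gender
-- ===== SOURCE A (Python) =====
-- FEMALE_ENDINGS = ("wati", "yani", "ani", "eni", "ini", "uni", "ati",
--                   "ah", "a", "i", "ita", "ina", "ela", "era", "nia",
--                   "nty", "nti", "nty")
--
-- FEMALE_NAMES = {
--     "sari", "dewi", "putri", "sri", "yuni", "tuti", "rita", "dina",
--     "lina", "mia",  "nia",   "ria", "rini", "widi", "ayu", "novi",
--     "noven", "cahyani", "indah", "fitri", "nurul", "ida", "lastri",
--     "wulan", "bulan", "laras", "sekar", "mawar", "melati", "anisa",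
--     "annisa", "nisa", "zahra", "fatimah", "siti", "nur", "noor",
--     "yayuk", "ratih", "retno", "endah", "suci", "cantika",
-- }
--
-- MALE_NAMES = {
--     "budi", "adi", "agus", "bambang", "dedi", "eko", "fajar", "galih",
--     "hendra", "irwan", "joko", "kukuh", "luthfi", "made", "nanda",
--     "oki", "pandu", "raka", "sigit", "tono", "umar", "vino", "wahyu",
--     "xander", "yogi", "zaki", "arif", "arif", "bagas", "bayu", "dimas",
--     "doni", "fadli", "febri", "gilang", "hafiz", "ilham", "ivan",
--     "jefri", "kevin", "lukman", "mario", "novan", "oscar", "putra",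
--     "radit", "rendi", "sandy", "tanto", "taufik", "ucup", "valdi",
--     "wawan", "yoga", "yusuf", "anto", "didik", "hadi", "iwan",
--     "koko", "nanang", "rudi", "sandi", "susanto", "teguh", "widodo",
-- }
--
-- def guess_gender(full_name: str) -> str:
--     """Return 'P' (perempuan) or 'L' (laki-laki) based on name heuristics."""
--     name_lower = full_name.lower()
--     parts = name_lower.split()
--
--     # Explicit male name wins immediately
--     for part in parts:
--         if part in MALE_NAMES:
--             return "L"
--
--     # Explicit female name
--     for part in parts:
--         if part in FEMALE_NAMES:
--             return "P"
--
--     # Check endings of each word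
--     for part in parts:
--         for ending in FEMALE_ENDINGS:
--             if part.endswith(ending) and len(part) > len(ending):
--                 return "P"
--
--     return "L"  # default to male if uncertain
-- ===== SOURCE B (Python) =====
-- FEMALE_ENDINGS = ("wati", "yani", "ani", "eni", "ini", "uni", "ati",
--                   "ah", "a", "i", "ita", "ina", "ela", "era", "nia",
--                   "nty", "nti", "nty")
--
-- FEMALE_NAMES = {
--     "sari", "dewi", "putri", "sri", "yuni", "tuti", "rita", "dina",
--     "lina", "mia",  "nia",   "ria", "rini", "widi", "ayu", "novi",
--     "noven", "cahyani", "indah", "fitri", "nurul", "ida", "lastri",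
--     "wulan", "bulan", "laras", "sekar", "mawar", "melati", "anisa",
--     "annisa", "nisa", "zahra", "fatimah", "siti", "nur", "noor",
--     "yayuk", "ratih", "retno", "endah", "suci", "cantika",
-- }
--
-- MALE_NAMES = {
--     "budi", "adi", "agus", "bambang", "dedi", "eko", "fajar", "galih",
--     "hendra", "irwan", "joko", "kukuh", "luthfi", "made", "nanda",
--     "oki", "pandu", "raka", "sigit", "tono", "umar", "vino", "wahyu",
--     "xander", "yogi", "zaki", "arif", "arif", "bagas", "bayu", "dimas",
--     "doni", "fadli", "febri", "gilang", "hafiz", "ilham", "ivan",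
--     "jefri", "kevin", "lukman", "mario", "novan", "oscar", "putra",
--     "radit", "rendi", "sandy", "tanto", "taufik", "ucup", "valdi",
--     "wawan", "yoga", "yusuf", "anto", "didik", "hadi", "iwan",
--     "koko", "nanang", "rudi", "sandi", "susanto", "teguh", "widodo",
-- }
--
-- # one unified rank per known name: female names rank 1, male names rank 2
-- # (male entries inserted last, so a name in both sets ranks male, like A's priority)
-- NAME_RANK = {}
-- for _n in FEMALE_NAMES:
--     NAME_RANK[_n] = 1
-- for _n in MALE_NAMES:
--     NAME_RANK[_n] = 2
--
-- # female endings grouped by length: one O(1) slice + set lookup per length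
-- # instead of 18 endswith calls per word
-- SUFFIXES_BY_LEN = (
--     (1, {"a", "i"}),
--     (2, {"ah"}),
--     (3, {"ani", "eni", "ini", "uni", "ati", "ita",
--          "ina", "ela", "era", "nia", "nty", "nti"}),
--     (4, {"wati", "yani"}),
-- )
--
--
-- def _rank(part):
--     """2 = male name, 1 = female name or female ending, 0 = no evidence."""
--     r = NAME_RANK.get(part, 0)
--     if r == 0 and any(len(part) > k and part[-k:] in tails
--                       for k, tails in SUFFIXES_BY_LEN):
--         r = 1
--     return r
--
--
-- def guess_gender(full_name: str) -> str:
--     """Return 'P' (perempuan) or 'L' (laki-laki) based on name heuristics."""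
--     best = 0
--     for part in full_name.lower().split():
--         best = max(best, _rank(part))
--     return "P" if best == 1 else "L"
-- ===== Notes on version B (the rewrite author's own statement) =====
-- stated objective: alternative
-- what changed: Replaces A's three sequential early-return scans (male set, female set, 18 endswith checks per word) with a single running-max pass over the words using one unified name-to-rank dict (female=1, male=2) and female endings grouped by length into sets, so each word does one dict lookup plus at most four slice-and-set lookups, and the final gender is read off the maximal rank.
import Mathlib
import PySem

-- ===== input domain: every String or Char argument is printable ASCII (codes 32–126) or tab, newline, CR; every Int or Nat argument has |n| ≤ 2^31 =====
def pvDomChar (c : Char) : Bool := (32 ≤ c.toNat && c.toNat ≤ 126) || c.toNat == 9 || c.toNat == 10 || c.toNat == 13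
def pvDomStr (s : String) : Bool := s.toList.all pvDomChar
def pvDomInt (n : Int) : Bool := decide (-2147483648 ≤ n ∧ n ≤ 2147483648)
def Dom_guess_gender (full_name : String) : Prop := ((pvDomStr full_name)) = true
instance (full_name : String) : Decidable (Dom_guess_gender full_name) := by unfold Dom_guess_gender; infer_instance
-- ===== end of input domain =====

-- B replaces A's three sequential early-return scans (two set scans + an 18-endswith inner
-- loop) with a single running-max pass: one unified name→rank dict lookup per word plus
-- length-indexed suffix sets (one slice + set lookup per suffix length); objective: alternative.

-- shared constant tables (module-level data in both Pythons)
def pvFemaleEndings : List String :=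
  ["wati", "yani", "ani", "eni", "ini", "uni", "ati",
   "ah", "a", "i", "ita", "ina", "ela", "era", "nia",
   "nty", "nti", "nty"]

def pvFemaleNames : PySem.Set String := PySem.Set.ofList
  ["sari", "dewi", "putri", "sri", "yuni", "tuti", "rita", "dina",
   "lina", "mia", "nia", "ria", "rini", "widi", "ayu", "novi",
   "noven", "cahyani", "indah", "fitri", "nurul", "ida", "lastri",
   "wulan", "bulan", "laras", "sekar", "mawar", "melati", "anisa",
   "annisa", "nisa", "zahra", "fatimah", "siti", "nur", "noor",
   "yayuk", "ratih", "retno", "endah", "suci", "cantika"]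

def pvMaleNames : PySem.Set String := PySem.Set.ofList
  ["budi", "adi", "agus", "bambang", "dedi", "eko", "fajar", "galih",
   "hendra", "irwan", "joko", "kukuh", "luthfi", "made", "nanda",
   "oki", "pandu", "raka", "sigit", "tono", "umar", "vino", "wahyu",
   "xander", "yogi", "zaki", "arif", "arif", "bagas", "bayu", "dimas",
   "doni", "fadli", "febri", "gilang", "hafiz", "ilham", "ivan",
   "jefri", "kevin", "lukman", "mario", "novan", "oscar", "putra",
   "radit", "rendi", "sandy", "tanto", "taufik", "ucup", "valdi",
   "wawan", "yoga", "yusuf", "anto", "didik", "hadi", "iwan",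
   "koko", "nanang", "rudi", "sandi", "susanto", "teguh", "widodo"]

-- ===== PORT A =====
-- first loop: early return "L" on a male name
def aLoopMale : List String → Option String
  | [] => none
  | p :: r => if PySem.Set.contains pvMaleNames p then some "L" else aLoopMale r

-- second loop: early return "P" on a female name
def aLoopFem : List String → Option String
  | [] => none
  | p :: r => if PySem.Set.contains pvFemaleNames p then some "P" else aLoopFem r

-- inner loop over FEMALE_ENDINGS for one word
def aEndLoop (p : String) : List String → Option String
  | [] => none
  | e :: r =>
      if PySem.Str.endswith p e && decide (PySem.Str.len e < PySem.Str.len p)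
      then some "P" else aEndLoop p r

-- third loop: ending check per word
def aLoopEnd : List String → Option String
  | [] => none
  | p :: r =>
      match aEndLoop p pvFemaleEndings with
      | some s => some s
      | none => aLoopEnd r

def guess_gender (full_name : String) : String :=
  let parts := PySem.Str.split₀ (PySem.Str.lower full_name)
  match aLoopMale parts with
  | some s => s
  | none =>
    match aLoopFem parts with
    | some s => s
    | none =>
      match aLoopEnd parts with
      | some s => s
      | none => "L"

-- ===== PORT B =====
-- NAME_RANK: female names inserted with rank 1, then male names overwrite with rank 2
def pvNameRank : PySem.Dict String Int :=
  List.foldl (fun d n => PySem.Dict.insert d n 2)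
    (List.foldl (fun d n => PySem.Dict.insert d n 1) PySem.Dict.empty pvFemaleNames)
    pvMaleNames

-- SUFFIXES_BY_LEN: female endings grouped by length
def pvSuffixesByLen : List (Nat × PySem.Set String) :=
  [(1, PySem.Set.ofList ["a", "i"]),
   (2, PySem.Set.ofList ["ah"]),
   (3, PySem.Set.ofList ["ani", "eni", "ini", "uni", "ati", "ita",
                         "ina", "ela", "era", "nia", "nty", "nti"]),
   (4, PySem.Set.ofList ["wati", "yani"])]

-- _rank: 2 = male name, 1 = female name or female ending, 0 = no evidence
def bRank (part : String) : Int :=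
  let r := PySem.Dict.getD pvNameRank part 0
  if r == 0 && pvSuffixesByLen.any (fun kt =>
       decide (kt.1 < PySem.Str.len part) &&
       PySem.Set.contains kt.2 (PySem.Str.slice part (some (-(kt.1 : Int))) none))
  then 1 else r

def guess_gender_alt (full_name : String) : String :=
  let best := (PySem.Str.split₀ (PySem.Str.lower full_name)).foldl
    (fun best part => max best (bRank part)) 0
  if best == 1 then "P" else "L"

-- ===== PRECONDITION & SPEC =====
def Spec_guess_gender (full_name : String) (out : String) : Prop := out = guess_gender_alt full_name
instance (full_name : String) (out : String) : Decidable (Spec_guess_gender full_name out) := by unfold Spec_guess_gender; infer_instance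

-- ===== CLAIM (what is proved, stated in full; the proofs are below) =====
def Claim_equal_guess_gender : Prop := ∀ (full_name : String), Dom_guess_gender full_name → Spec_guess_gender full_name (guess_gender full_name)

-- ===== LEMMAS AND PROOFS =====

theorem aLoopMale_eq (l : List String) :
    aLoopMale l = if l.any (fun p => PySem.Set.contains pvMaleNames p) then some "L" else none := by
  induction l with
  | nil => rfl
  | cons p r ih =>
      cases h : PySem.Set.contains pvMaleNames p <;>
        simp only [aLoopMale, List.any_cons, h, Bool.false_or, Bool.true_or, if_true, ih,
          Bool.false_eq_true, if_false]

theorem aLoopFem_eq (l : List String) :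
    aLoopFem l = if l.any (fun p => PySem.Set.contains pvFemaleNames p) then some "P" else none := by
  induction l with
  | nil => rfl
  | cons p r ih =>
      cases h : PySem.Set.contains pvFemaleNames p <;>
        simp only [aLoopFem, List.any_cons, h, Bool.false_or, Bool.true_or, if_true, ih,
          Bool.false_eq_true, if_false]

-- per-word A-side ending test, as a Bool
def aEndAny (p : String) : Bool :=
  pvFemaleEndings.any (fun e => PySem.Str.endswith p e && decide (PySem.Str.len e < PySem.Str.len p))

theorem aEndLoop_eq (p : String) (es : List String) :
    aEndLoop p es =
      if es.any (fun e => PySem.Str.endswith p e && decide (PySem.Str.len e < PySem.Str.len p))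
      then some "P" else none := by
  induction es with
  | nil => rfl
  | cons e r ih =>
      cases h : (PySem.Str.endswith p e && decide (PySem.Str.len e < PySem.Str.len p)) <;>
        simp only [aEndLoop, List.any_cons, h, Bool.false_or, Bool.true_or, if_true, ih,
          Bool.false_eq_true, if_false]

theorem aLoopEnd_eq (l : List String) :
    aLoopEnd l = if l.any aEndAny then some "P" else none := by
  induction l with
  | nil => rfl
  | cons p r ih =>
      cases h : aEndAny p <;>
      · simp only [aLoopEnd, aEndLoop_eq]
        rw [show (pvFemaleEndings.any fun e =>
          PySem.Str.endswith p e && decide (PySem.Str.len e < PySem.Str.len p)) = aEndAny p from rfl, h]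
        simp only [List.any_cons, h, Bool.false_or, Bool.true_or, if_true, ih,
          Bool.false_eq_true, if_false]

-- B-side per-word suffix test, as a Bool
def bSuffixHit (p : String) : Bool :=
  pvSuffixesByLen.any (fun kt =>
    decide (kt.1 < PySem.Str.len p) &&
    PySem.Set.contains kt.2 (PySem.Str.slice p (some (-(kt.1 : Int))) none))

-- one female ending, both ways: endswith + length guard = length guard + last-k-slice equality
theorem atom_eq (p e : String) (k : Nat) (hk : e.toList.length = k) (hk0 : 0 < k) :
    (PySem.Str.endswith p e && decide (PySem.Str.len e < PySem.Str.len p))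
      = (decide (k < PySem.Str.len p) &&
         (PySem.Str.slice p (some (-(k : Int))) none == e)) := by
  have hle : PySem.Str.len e = k := by simpa using hk
  rw [hle]
  by_cases h : k < PySem.Str.len p
  · have hkp : k < p.toList.length := by simpa using h
    simp only [h, decide_true, Bool.and_true, Bool.true_and]
    rw [Bool.eq_iff_iff]
    have hslice : (PySem.Str.slice p (some (-(k : Int))) none).toList
        = p.toList.drop (p.toList.length - k) := by
      simp [PySem.Str.toList_slice, PySem.List.slice_from_neg_natCast _ _ hk0]
    constructor
    · intro hsuf
      rw [show PySem.Str.endswith p e = PySem.Chars.endswith p.toList e.toList from by simp,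
        PySem.Chars.endswith_iff] at hsuf
      rw [beq_iff_eq]
      apply String.toList_inj.mp
      rw [hslice, ← hk]
      obtain ⟨t, ht⟩ := hsuf
      rw [← ht]
      simp
    · intro hbe
      rw [beq_iff_eq] at hbe
      rw [show PySem.Str.endswith p e = PySem.Chars.endswith p.toList e.toList from by simp,
        PySem.Chars.endswith_iff]
      have : p.toList.drop (p.toList.length - k) = e.toList := by
        rw [← hslice, hbe]
      exact this ▸ List.drop_suffix _ _
  · simp only [h, decide_false, Bool.and_false, Bool.false_and]

theorem set_contains_ofList (l : List String) (x : String) :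
    PySem.Set.contains (PySem.Set.ofList l) x = l.contains x := by
  rw [Bool.eq_iff_iff]
  simp [PySem.Set.contains, PySem.Set.mem_ofList]

-- the 4 length-indexed suffix buckets test exactly what the 18 endswith checks test
set_option maxHeartbeats 2000000 in
theorem suffix_eq (p : String) : bSuffixHit p = aEndAny p := by
  unfold bSuffixHit aEndAny pvSuffixesByLen pvFemaleEndings
  simp only [List.any_cons, List.any_nil, set_contains_ofList, List.contains_cons,
    List.contains_nil, Bool.or_false]
  rw [atom_eq p "wati" 4 (by decide) (by norm_num),
    atom_eq p "yani" 4 (by decide) (by norm_num),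
    atom_eq p "ani" 3 (by decide) (by norm_num),
    atom_eq p "eni" 3 (by decide) (by norm_num),
    atom_eq p "ini" 3 (by decide) (by norm_num),
    atom_eq p "uni" 3 (by decide) (by norm_num),
    atom_eq p "ati" 3 (by decide) (by norm_num),
    atom_eq p "ah" 2 (by decide) (by norm_num),
    atom_eq p "a" 1 (by decide) (by norm_num),
    atom_eq p "i" 1 (by decide) (by norm_num),
    atom_eq p "ita" 3 (by decide) (by norm_num),
    atom_eq p "ina" 3 (by decide) (by norm_num),
    atom_eq p "ela" 3 (by decide) (by norm_num),
    atom_eq p "era" 3 (by decide) (by norm_num),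
    atom_eq p "nia" 3 (by decide) (by norm_num),
    atom_eq p "nty" 3 (by decide) (by norm_num),
    atom_eq p "nti" 3 (by decide) (by norm_num)]
  by_cases h1 : ((1 : Nat) : Int) < PySem.Str.len p <;>
    by_cases h2 : ((2 : Nat) : Int) < PySem.Str.len p <;>
    by_cases h3 : ((3 : Nat) : Int) < PySem.Str.len p <;>
    by_cases h4 : ((4 : Nat) : Int) < PySem.Str.len p <;>
    simp only [h1, h2, h3, h4, decide_true, decide_false, Bool.true_and, Bool.false_and,
      Bool.false_or, Bool.or_false] <;>
    simp [Bool.or_comm, Bool.or_left_comm, Bool.or_assoc]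

-- NAME_RANK lookup: male names rank 2, else female names rank 1, else the default 0
theorem getD_foldl_insert_const {κ : Type} [BEq κ] [LawfulBEq κ] [DecidableEq κ]
    (l : List κ) (d : PySem.Dict κ Int) (c : Int) (x : κ) (d0 : Int) :
    PySem.Dict.getD (List.foldl (fun d n => PySem.Dict.insert d n c) d l) x d0
      = if l.contains x then c else PySem.Dict.getD d x d0 := by
  induction l generalizing d with
  | nil => simp
  | cons y t ih =>
      simp only [List.foldl_cons, ih, List.contains_cons, PySem.Dict.getD_insert]
      by_cases hx : x = y
      · subst hx
        by_cases ht : t.contains x <;> simp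
      · by_cases ht : t.contains x <;> simp [hx]

set_option maxRecDepth 20000 in
theorem nameRank_eq (p : String) :
    PySem.Dict.getD pvNameRank p 0
      = if PySem.Set.contains pvMaleNames p then 2
        else if PySem.Set.contains pvFemaleNames p then 1 else 0 := by
  unfold pvNameRank
  rw [getD_foldl_insert_const, getD_foldl_insert_const, PySem.Dict.getD_empty]
  rfl

theorem bRank_eq (p : String) :
    bRank p = if PySem.Set.contains pvMaleNames p then 2
              else if PySem.Set.contains pvFemaleNames p || aEndAny p then 1 else 0 := by
  unfold bRank
  rw [nameRank_eq, show (pvSuffixesByLen.any fun kt =>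
       decide (kt.1 < PySem.Str.len p) &&
       PySem.Set.contains kt.2 (PySem.Str.slice p (some (-(kt.1 : Int))) none)) = aEndAny p
     from suffix_eq p]
  cases hm : PySem.Set.contains pvMaleNames p <;>
    cases hf : PySem.Set.contains pvFemaleNames p <;>
    cases he : aEndAny p <;> simp

-- the running max of the ranks, characterised by the three any-flags
theorem foldl_max_rank (parts : List String) (a : Int) (ha : 0 ≤ a) :
    parts.foldl (fun best part => max best (bRank part)) a
      = max a (if parts.any (fun p => PySem.Set.contains pvMaleNames p) then 2
               else if parts.any (fun p => PySem.Set.contains pvFemaleNames p || aEndAny p) then 1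
               else 0) := by
  induction parts generalizing a with
  | nil => simpa using (max_eq_left ha).symm
  | cons p t ih =>
      rw [List.foldl_cons, ih (max a (bRank p)) (le_trans ha (le_max_left _ _)), bRank_eq]
      cases hm : PySem.Set.contains pvMaleNames p <;>
        cases hf : PySem.Set.contains pvFemaleNames p <;>
        cases he : aEndAny p <;>
        simp only [List.any_cons, hm, hf, he, Bool.true_or, Bool.false_or, Bool.or_false,
          Bool.or_true, if_true, if_false, Bool.false_eq_true] <;>
        split_ifs <;> omega

theorem any_or_split (l : List String) (f g : String → Bool) :
    (l.any fun x => f x || g x) = (l.any f || l.any g) := by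
  induction l with
  | nil => rfl
  | cons x r ih =>
      simp only [List.any_cons, ih]
      cases f x <;> cases g x <;> cases r.any f <;> cases r.any g <;> rfl

-- ===== VERDICT (by name: the statement is the Claim_ definition above) =====
theorem guess_gender_spec : Claim_equal_guess_gender := by
  intro full_name _
  show guess_gender full_name = guess_gender_alt full_name
  simp only [guess_gender, guess_gender_alt]
  rw [aLoopMale_eq, aLoopFem_eq, aLoopEnd_eq, foldl_max_rank _ 0 le_rfl, any_or_split]
  cases hm : (PySem.Str.split₀ (PySem.Str.lower full_name)).any
      (fun p => PySem.Set.contains pvMaleNames p) <;>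
    cases hf : (PySem.Str.split₀ (PySem.Str.lower full_name)).any
      (fun p => PySem.Set.contains pvFemaleNames p) <;>
    cases he : (PySem.Str.split₀ (PySem.Str.lower full_name)).any aEndAny <;>
    simp
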